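-- pv_equiv track=rewrite | github.com/xliry/desloppify | desloppify/languages/typescript/syntax/scanner.py | scan_code
-- ===== SOURCE A (Python) =====
-- from collections.abc import Generator
--
-- def scan_code(
--     text: str, start: int = 0, end: int | None = None
-- ) -> Generator[tuple[int, str, bool], None, None]:
--     """Yield ``(index, char, in_string)`` tuples while handling escapes."""
--     i = start
--     limit = end if end is not None else len(text)
--     in_str = None
--     while i < limit:
--         ch = text[i]
--         if in_str:
--             if ch == "\\" and i + 1 < limit:
--                 yield (i, ch, True)
--                 i += 1
--                 yield (i, text[i], True)
--                 i += 1
--                 continue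
--             if ch == in_str:
--                 in_str = None
--             yield (i, ch, in_str is not None)
--         else:
--             if ch in ("'", '"', "`"):
--                 in_str = ch
--                 yield (i, ch, True)
--             else:
--                 yield (i, ch, False)
--         i += 1
-- ===== SOURCE B (Python) =====
-- def scan_code(text, start=0, end=None):
--     """Yield (index, char, in_string) tuples while handling escapes.
--
--     Two-phase segmented scanner: an outer loop alternates a plain-code
--     phase and a string-literal phase, so the 'am I inside a string'
--     state lives in the program counter (which inner loop is running)
--     rather than in an in_str data variable.
--     """
--     limit = end if end is not None else len(text)
--     i = start
--     while i < limit: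
--         # code phase: emit chars until an opening quote
--         while i < limit and text[i] not in "'\"`":
--             yield (i, text[i], False)
--             i += 1
--         if i >= limit:
--             return
--         q = text[i]
--         yield (i, q, True)
--         i += 1
--         # string phase: emit the literal's body up to its closing quote
--         while i < limit:
--             ch = text[i]
--             if ch == "\\" and i + 1 < limit:
--                 yield (i, ch, True)
--                 yield (i + 1, text[i + 1], True)
--                 i += 2
--             elif ch == q:
--                 yield (i, ch, False)
--                 i += 1
--                 break
--             else:
--                 yield (i, ch, True)
--                 i += 1
-- ===== Notes on version B (the rewrite author's own statement) =====
-- stated objective: alternative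
-- what changed: Replaces A's flat single-loop state machine (an in_str variable consulted on every char) by a two-phase segmented scanner: an outer loop alternates a code-phase inner loop and a string-literal-phase inner loop, so the in-string state is encoded in control flow instead of data.
import Mathlib
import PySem

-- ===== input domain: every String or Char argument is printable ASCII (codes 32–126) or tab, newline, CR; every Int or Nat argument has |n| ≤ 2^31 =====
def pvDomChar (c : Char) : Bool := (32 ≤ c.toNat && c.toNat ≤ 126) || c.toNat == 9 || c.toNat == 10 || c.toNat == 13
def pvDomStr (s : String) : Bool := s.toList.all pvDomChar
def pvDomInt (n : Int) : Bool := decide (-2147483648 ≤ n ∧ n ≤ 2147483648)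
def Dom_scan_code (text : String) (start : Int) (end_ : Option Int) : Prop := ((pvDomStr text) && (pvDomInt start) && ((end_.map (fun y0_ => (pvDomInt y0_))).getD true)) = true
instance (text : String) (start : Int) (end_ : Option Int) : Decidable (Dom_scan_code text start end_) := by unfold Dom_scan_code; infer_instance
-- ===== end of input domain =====

-- B replaces A's flat state machine (in_str variable) by a two-phase segmented scanner
-- (alternating code-phase and string-phase loops); objective: alternative decomposition.
-- Both sources are generators; their yielded sequences are ported as the returned list.

-- ===== PORT A =====
-- fuel = number of remaining loop indices (limit - i); the escape branch consumes 2.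
def scanA_go (text : String) (limit : Int) : Nat → Int → Option Char → List (Int × String × Bool)
  | 0, _, _ => []
  | fuel+1, i, in_str =>
    if i < limit then
      match PySem.Str.pyGet? text i with
      | none => []   -- Python raises IndexError here (excluded by Pre_)
      | some ch =>
        match in_str with
        | some q =>
          if ch = '\\' ∧ i + 1 < limit then
            match PySem.Str.pyGet? text (i+1) with
            | none => [(i, ch.toString, true)]   -- IndexError on text[i+1] (excluded by Pre_)
            | some c2 =>
              (i, ch.toString, true) :: (i+1, c2.toString, true) ::
                (match fuel with
                 | 0 => []
                 | m+1 => scanA_go text limit m (i+2) (some q))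
          else if ch = q then
            (i, ch.toString, false) :: scanA_go text limit fuel (i+1) none
          else
            (i, ch.toString, true) :: scanA_go text limit fuel (i+1) (some q)
        | none =>
          if ch = '\'' ∨ ch = '"' ∨ ch = '`' then
            (i, ch.toString, true) :: scanA_go text limit fuel (i+1) (some ch)
          else
            (i, ch.toString, false) :: scanA_go text limit fuel (i+1) none
    else []

def scan_code (text : String) (start : Int) (end_ : Option Int) : List (Int × String × Bool) :=
  let limit := end_.getD (PySem.Str.len text)
  scanA_go text limit (limit - start).toNat start none

-- ===== PORT B =====
-- Two mutually recursive phases, mirroring Source B's two inner loops; same fuel discipline.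
mutual
def scanB_code (text : String) (limit : Int) : Nat → Int → List (Int × String × Bool)
  | 0, _ => []
  | fuel+1, i =>
    if i < limit then
      match PySem.Str.pyGet? text i with
      | none => []   -- Python raises IndexError here (excluded by Pre_)
      | some ch =>
        if ch = '\'' ∨ ch = '"' ∨ ch = '`' then
          -- opening quote: emit it and switch to the string phase
          (i, ch.toString, true) :: scanB_str text limit fuel (i+1) ch
        else
          (i, ch.toString, false) :: scanB_code text limit fuel (i+1)
    else []

def scanB_str (text : String) (limit : Int) : Nat → Int → Char → List (Int × String × Bool)
  | 0, _, _ => []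
  | fuel+1, i, q =>
    if i < limit then
      match PySem.Str.pyGet? text i with
      | none => []   -- Python raises IndexError here (excluded by Pre_)
      | some ch =>
        if ch = '\\' ∧ i + 1 < limit then
          match PySem.Str.pyGet? text (i+1) with
          | none => [(i, ch.toString, true)]   -- IndexError on text[i+1] (excluded by Pre_)
          | some c2 =>
            (i, ch.toString, true) :: (i+1, c2.toString, true) ::
              (match fuel with
               | 0 => []
               | m+1 => scanB_str text limit m (i+2) q)
        else if ch = q then
          -- closing quote: emit it and return to the code phase
          (i, ch.toString, false) :: scanB_code text limit fuel (i+1)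
        else
          (i, ch.toString, true) :: scanB_str text limit fuel (i+1) q
    else []
end

def scan_code_alt (text : String) (start : Int) (end_ : Option Int) : List (Int × String × Bool) :=
  let limit := end_.getD (PySem.Str.len text)
  scanB_code text limit (limit - start).toNat start

-- ===== PRECONDITION & SPEC =====
-- Pre_ excludes exactly the inputs on which Python's text[i] raises IndexError:
-- some visited index i (start ≤ i < limit) lies outside [-len(text), len(text)).
def Pre_scan_code (text : String) (start : Int) (end_ : Option Int) : Prop :=
  let n := PySem.Str.len text
  let limit := end_.getD n
  limit ≤ start ∨ (-n ≤ start ∧ limit ≤ n)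
instance (text : String) (start : Int) (end_ : Option Int) : Decidable (Pre_scan_code text start end_) := by unfold Pre_scan_code; infer_instance

def pvWitness_scan_code : String × Int × Option Int := ("a'b\\'c'd", 0, none)

def Spec_scan_code (text : String) (start : Int) (end_ : Option Int) (out : List (Int × String × Bool)) : Prop := out = scan_code_alt text start end_
instance (text : String) (start : Int) (end_ : Option Int) (out : List (Int × String × Bool)) : Decidable (Spec_scan_code text start end_ out) := by unfold Spec_scan_code; infer_instance

-- ===== CLAIM (what is proved, stated in full; the proofs are below) =====
def Claim_equal_scan_code : Prop := ∀ (text : String) (start : Int) (end_ : Option Int), Dom_scan_code text start end_ → Pre_scan_code text start end_ → Spec_scan_code text start end_ (scan_code text start end_)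

-- ===== LEMMAS AND PROOFS =====

-- A's state `none` matches B's code phase, A's state `some q` matches B's string phase;
-- the two sides consume fuel identically, so the equality holds for every fuel.
lemma scan_go_eq (text : String) (limit : Int) :
    ∀ (fuel : Nat) (i : Int),
      scanA_go text limit fuel i none = scanB_code text limit fuel i ∧
      ∀ q, scanA_go text limit fuel i (some q) = scanB_str text limit fuel i q := by
  intro fuel
  induction fuel using Nat.strong_induction_on with
  | _ fuel ih =>
    intro i
    match fuel with
    | 0 => exact ⟨rfl, fun _ => rfl⟩
    | n+1 =>
      constructor
      · rw [scanA_go, scanB_code.eq_def]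
        by_cases hi : i < limit
        · simp only [if_pos hi]
          cases hg : PySem.Str.pyGet? text i with
          | none => rfl
          | some ch =>
            by_cases hq : ch = '\'' ∨ ch = '"' ∨ ch = '`'
            · simp only [if_pos hq, (ih n (by omega) (i+1)).2 ch]
            · simp only [if_neg hq, (ih n (by omega) (i+1)).1]
        · simp only [if_neg hi]
      · intro q
        rw [scanA_go, scanB_str.eq_def]
        by_cases hi : i < limit
        · simp only [if_pos hi]
          cases hg : PySem.Str.pyGet? text i with
          | none => rfl
          | some ch =>
            by_cases hesc : ch = '\\' ∧ i + 1 < limit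
            · simp only [if_pos hesc]
              cases hg2 : PySem.Str.pyGet? text (i+1) with
              | none => rfl
              | some c2 =>
                match n with
                | 0 => rfl
                | m+1 => simp only [((ih m (by omega) (i+2)).2 q)]
            · by_cases hc : ch = q
              · simp only [if_neg hesc, if_pos hc, (ih n (by omega) (i+1)).1]
              · simp only [if_neg hesc, if_neg hc, (ih n (by omega) (i+1)).2 q]
        · simp only [if_neg hi]

-- ===== VERDICT (by name: the statement is the Claim_ definition above) =====
theorem scan_code_spec : Claim_equal_scan_code := by
  intro text start end_ _ _
  unfold Spec_scan_code scan_code scan_code_alt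
  exact (scan_go_eq text _ _ start).1
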